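-- pv_equiv track=rewrite | github.com/TsumaR/atcoder | aribook/full_search/arc006c.py | stacking
-- ===== SOURCE A (Python) =====
-- def stacking(box, tower):
--     if tower == [] or box > max(tower):
--         tower.append(box)
--     else:
--         tower.sort()
--         for i in range(len(tower)):
--             if tower[i] >= box:
--                 tower[i] = box
--                 break
--
--     return tower
-- ===== SOURCE B (Python) =====
-- def stacking(box, tower):
--     taller = [t for t in tower if t >= box]
--     if not taller:
--         tower.append(box)
--     else:
--         tower.remove(min(taller))
--         tower.append(box)
--         tower.sort()
--     return tower
-- ===== Notes on version B (the rewrite author's own statement) =====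
-- stated objective: alternative
-- what changed: Instead of sorting and overwriting the first sorted element >= box, B filters out the tops that can take the box, removes the smallest of them from the tower, appends the box and sorts once; the no-candidate test replaces the max() guard.
import Mathlib
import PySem

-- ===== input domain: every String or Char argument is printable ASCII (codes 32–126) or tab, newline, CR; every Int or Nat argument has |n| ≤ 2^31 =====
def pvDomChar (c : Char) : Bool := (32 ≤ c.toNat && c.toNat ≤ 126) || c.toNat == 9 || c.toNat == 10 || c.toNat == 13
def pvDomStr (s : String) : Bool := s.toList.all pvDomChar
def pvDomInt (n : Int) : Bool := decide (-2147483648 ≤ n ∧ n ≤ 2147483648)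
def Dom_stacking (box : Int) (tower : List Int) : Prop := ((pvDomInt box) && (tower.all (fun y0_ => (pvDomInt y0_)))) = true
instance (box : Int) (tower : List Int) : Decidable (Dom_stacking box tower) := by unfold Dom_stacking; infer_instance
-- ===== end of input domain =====

-- B computes by multiset surgery instead of A's sort-then-overwrite: it collects the tops
-- that can take the box, removes the smallest of them, appends the box and sorts
-- (alternative decomposition; same in-place mutation of `tower`; equal return values proved below).

-- ===== PORT A =====
-- A's `for i in range(len(tower)): if tower[i] >= box: tower[i] = box; break`
def pvReplaceLoop (box : Int) : List Int → List Int
  | [] => []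
  | x :: xs => if x ≥ box then box :: xs else x :: pvReplaceLoop box xs

def stacking (box : Int) (tower : List Int) : List Int :=
  -- `tower == [] or box > max(tower)` : max? = none exactly when tower == []
  match PySem.List.max? tower (fun y => y) with
  | none => tower ++ [box]
  | some m =>
      if box > m then tower ++ [box]
      else pvReplaceLoop box (PySem.List.sorted tower (fun x => x))

-- ===== PORT B =====
def stacking_alt (box : Int) (tower : List Int) : List Int :=
  let taller := tower.filter (fun t => decide (box ≤ t))
  if taller = [] then tower ++ [box]
  else
    -- here taller ≠ [] so Python's min(taller) is (min? taller).getD _, and the minimum is a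
    -- member of tower, so tower.remove(m) is (remove? tower m).getD _ (both defaults unreachable)
    let m := (PySem.List.min? taller (fun y => y)).getD 0
    PySem.List.sorted (((PySem.List.remove? tower m).getD tower) ++ [box]) (fun x => x)

-- ===== PRECONDITION & SPEC =====
def Spec_stacking (box : Int) (tower : List Int) (out : List Int) : Prop := out = stacking_alt box tower
instance (box : Int) (tower : List Int) (out : List Int) : Decidable (Spec_stacking box tower out) := by unfold Spec_stacking; infer_instance

-- ===== CLAIM (what is proved, stated in full; the proofs are below) =====
def Claim_equal_stacking : Prop := ∀ (box : Int) (tower : List Int), Dom_stacking box tower → Spec_stacking box tower (stacking box tower)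

-- ===== LEMMAS AND PROOFS =====

-- every element of pvReplaceLoop's result is box or came from the input
theorem pvReplaceLoop_mem (box : Int) (s : List Int) :
    ∀ y ∈ pvReplaceLoop box s, y = box ∨ y ∈ s := by
  induction s with
  | nil => simp [pvReplaceLoop]
  | cons x xs ih =>
    intro y hy
    by_cases h : x ≥ box <;> simp [pvReplaceLoop, h] at hy
    · rcases hy with h1 | h1
      · exact Or.inl h1
      · exact Or.inr (by simp [h1])
    · rcases hy with h1 | h1
      · exact Or.inr (by simp [h1])
      · rcases ih y h1 with h2 | h2
        · exact Or.inl h2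
        · exact Or.inr (by simp [h2])

-- replacing the first element ≥ box keeps the list sorted
theorem pvReplaceLoop_pairwise (box : Int) (s : List Int)
    (hs : s.Pairwise (fun a b => a ≤ b)) :
    (pvReplaceLoop box s).Pairwise (fun a b => a ≤ b) := by
  induction s with
  | nil => simp [pvReplaceLoop]
  | cons x xs ih =>
    rcases List.pairwise_cons.mp hs with ⟨hx, hxs⟩
    by_cases h : x ≥ box
    · simp only [pvReplaceLoop, if_pos h]
      exact List.pairwise_cons.mpr ⟨fun y hy => le_trans h (hx y hy), hxs⟩
    · simp only [pvReplaceLoop, if_neg h]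
      refine List.pairwise_cons.mpr ⟨?_, ih hxs⟩
      intro y hy
      rcases pvReplaceLoop_mem box xs y hy with h1 | h1
      · exact h1 ▸ le_of_lt (lt_of_not_ge h)
      · exact hx y h1

-- the loop's result is a permutation of box :: (the list with its first element ≥ box erased)
theorem pvReplaceLoop_perm (box : Int) (s : List Int) (hex : ∃ x ∈ s, box ≤ x) :
    (pvReplaceLoop box s).Perm (box :: s.eraseP (fun x => decide (box ≤ x))) := by
  induction s with
  | nil => rcases hex with ⟨x, hx, _⟩; simp at hx
  | cons x xs ih =>
    by_cases h : x ≥ box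
    · simp [pvReplaceLoop, h, List.eraseP_cons_of_pos, List.Perm.refl]
    · have hex' : ∃ y ∈ xs, box ≤ y := by
        rcases hex with ⟨y, hy, hby⟩
        rcases List.mem_cons.mp hy with h1 | h1
        · exact absurd (h1 ▸ hby) h
        · exact ⟨y, h1, hby⟩
      have : (fun x => decide (box ≤ x)) x = false := by simpa using h
      simp only [pvReplaceLoop, if_neg h, List.eraseP_cons, this]
      exact ((ih hex').cons x).trans (List.Perm.swap box x _)

-- in a sorted list, erasing the first element ≥ box is erasing the first occurrence of the
-- minimum m of the elements ≥ box
theorem erasePge_eq_erase (box m : Int) : ∀ (s : List Int),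
    s.Pairwise (fun a b => a ≤ b) → m ∈ s → box ≤ m → (∀ y ∈ s, box ≤ y → m ≤ y) →
    s.eraseP (fun x => decide (box ≤ x)) = s.erase m := by
  intro s
  induction s with
  | nil => intro _ h; simp at h
  | cons x xs ih =>
    intro hs hm hbm hmin
    rcases List.pairwise_cons.mp hs with ⟨hx, hxs⟩
    by_cases h : box ≤ x
    · have hxm : x = m := by
        rcases List.mem_cons.mp hm with h1 | h1
        · exact h1.symm
        · exact le_antisymm (hx m h1) (hmin x (by simp) h)
      rw [List.eraseP_cons_of_pos (by simpa using h), hxm, List.erase_cons_head]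
    · have hxm : x ≠ m := by intro he; exact h (he ▸ hbm)
      have hm' : m ∈ xs := by
        rcases List.mem_cons.mp hm with h1 | h1
        · exact absurd h1.symm hxm
        · exact h1
      rw [List.eraseP_cons_of_neg (by simpa using h),
          List.erase_cons_tail (by simpa using hxm),
          ih hxs hm' hbm (fun y hy hby => hmin y (by simp [hy]) hby)]

theorem stacking_spec_aux (box : Int) (tower : List Int) :
    stacking box tower = stacking_alt box tower := by
  by_cases hT : tower.filter (fun t => decide (box ≤ t)) = []
  · -- no tower top can take the box: both sides append
    have hlt : ∀ t ∈ tower, t < box := by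
      intro t ht
      by_contra hc
      have : t ∈ tower.filter (fun t => decide (box ≤ t)) :=
        List.mem_filter.mpr ⟨ht, by simpa using le_of_not_gt hc⟩
      simp [hT] at this
    have hB : stacking_alt box tower = tower ++ [box] := by
      unfold stacking_alt; rw [if_pos hT]
    rw [hB]
    rcases hmax : PySem.List.max? tower (fun y => y) with _ | mx
    · unfold stacking; rw [hmax]
    · have : box > mx := hlt mx (PySem.List.max?_mem hmax)
      unfold stacking; rw [hmax]; simp [this]
  · -- some top ≥ box exists
    obtain ⟨t0, ht0, hbt0⟩ : ∃ t ∈ tower, box ≤ t := by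
      rcases List.exists_mem_of_ne_nil _ hT with ⟨y, hy⟩
      rcases List.mem_filter.mp hy with ⟨h1, h2⟩
      exact ⟨y, h1, by simpa using h2⟩
    -- A takes the loop branch
    have hne : tower ≠ [] := by intro h; rw [h] at ht0; simp at ht0
    obtain ⟨mx, hmax⟩ : ∃ mx, PySem.List.max? tower (fun y => y) = some mx := by
      rcases hm : PySem.List.max? tower (fun y => y) with _ | mx
      · exact absurd ((PySem.List.max?_eq_none_iff _ _).mp hm) hne
      · exact ⟨mx, rfl⟩
    have hnb : ¬ box > mx := not_lt.mpr (le_trans hbt0 (PySem.List.max?_isMax hmax t0 ht0))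
    set s := PySem.List.sorted tower (fun x => x) with hsdef
    have hA : stacking box tower = pvReplaceLoop box s := by
      unfold stacking; rw [hmax]; simp [hnb, hsdef]
    -- B's minimum m
    obtain ⟨m, hmin⟩ : ∃ m, PySem.List.min? (tower.filter (fun t => decide (box ≤ t))) (fun y => y) = some m := by
      rcases hm : PySem.List.min? (tower.filter (fun t => decide (box ≤ t))) (fun y => y) with _ | m
      · exact absurd ((PySem.List.min?_eq_none_iff _ _).mp hm) hT
      · exact ⟨m, rfl⟩
    have hmF : m ∈ tower.filter (fun t => decide (box ≤ t)) := PySem.List.min?_mem hmin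
    have hmT : m ∈ tower := (List.mem_filter.mp hmF).1
    have hbm : box ≤ m := by simpa using (List.mem_filter.mp hmF).2
    have hmmin : ∀ y ∈ tower, box ≤ y → m ≤ y := by
      intro y hy hby
      exact PySem.List.min?_isMin hmin y (List.mem_filter.mpr ⟨hy, by simpa using hby⟩)
    have hrem : PySem.List.remove? tower m = some (tower.erase m) :=
      PySem.List.remove?_eq_some_erase tower m hmT
    have hB : stacking_alt box tower =
        PySem.List.sorted (tower.erase m ++ [box]) (fun x => x) := by
      unfold stacking_alt
      rw [if_neg hT]
      simp only [hmin, Option.getD_some, hrem]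
    rw [hA, hB]
    -- both sides are sorted and are permutations of each other
    have hpw : s.Pairwise (fun a b => a ≤ b) := by
      simpa using PySem.List.sorted_pairwise tower (fun x => x)
    have hperm_s : s.Perm tower := PySem.List.sorted_perm tower (fun x => x) false
    have hms : m ∈ s := hperm_s.mem_iff.mpr hmT
    have hmmin_s : ∀ y ∈ s, box ≤ y → m ≤ y := fun y hy => hmmin y (hperm_s.mem_iff.mp hy)
    have hexs : ∃ x ∈ s, box ≤ x := ⟨m, hms, hbm⟩
    have hApw : (pvReplaceLoop box s).Pairwise (fun a b => a ≤ b) :=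
      pvReplaceLoop_pairwise box s hpw
    have hBpw : (PySem.List.sorted (tower.erase m ++ [box]) (fun x => x)).Pairwise
        (fun a b => a ≤ b) := by
      simpa using PySem.List.sorted_pairwise (tower.erase m ++ [box]) (fun x => x)
    have hperm : (pvReplaceLoop box s).Perm
        (PySem.List.sorted (tower.erase m ++ [box]) (fun x => x)) := by
      refine ((pvReplaceLoop_perm box s hexs).trans ?_).trans
        (PySem.List.sorted_perm (tower.erase m ++ [box]) (fun x => x) false).symm
      rw [erasePge_eq_erase box m s hpw hms hbm hmmin_s]
      exact ((hperm_s.erase m).cons box).trans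
        (by simpa using (List.perm_append_comm (l₁ := [box]) (l₂ := tower.erase m)))
    exact hperm.eq_of_pairwise (fun a b _ _ h1 h2 => le_antisymm h1 h2) hApw hBpw

-- ===== VERDICT (by name: the statement is the Claim_ definition above) =====
theorem stacking_spec : Claim_equal_stacking := by
  intro box tower _
  unfold Spec_stacking
  exact stacking_spec_aux box tower
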